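-- pv_equiv track=rewrite | github.com/xiaoyuann/python | tfRec-master/developed/GLLCF.py | count
-- ===== SOURCE A (Python) =====
-- def count(li):
--     c0, c1, c2 = 0, 0, 0
--     for l in li:
--         if l == 0:
--             c0 += 1
--         elif l == 1:
--             c1 += 1
--         else:
--             c2 += 1
--     return [c0, c1, c2]
-- ===== SOURCE B (Python) =====
-- def count(li):
--     # Divide-and-conquer: count vectors of halves are merged by pairwise addition.
--     def go(lo, hi):
--         if hi <= lo:
--             return (0, 0, 0)
--         if hi - lo == 1:
--             x = li[lo]
--             if x == 0:
--                 return (1, 0, 0)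
--             if x == 1:
--                 return (0, 1, 0)
--             return (0, 0, 1)
--         mid = (lo + hi) // 2
--         a0, a1, a2 = go(lo, mid)
--         b0, b1, b2 = go(mid, hi)
--         return (a0 + b0, a1 + b1, a2 + b2)
--     return list(go(0, len(li)))
-- ===== Notes on version B (the rewrite author's own statement) =====
-- stated objective: alternative
-- what changed: The single left-to-right accumulating if/elif loop is replaced by a divide-and-conquer recursion: the index range is split in half, each half's (zeros, ones, others) vector is computed recursively, and the two vectors are merged by pairwise addition.
import Mathlib
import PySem

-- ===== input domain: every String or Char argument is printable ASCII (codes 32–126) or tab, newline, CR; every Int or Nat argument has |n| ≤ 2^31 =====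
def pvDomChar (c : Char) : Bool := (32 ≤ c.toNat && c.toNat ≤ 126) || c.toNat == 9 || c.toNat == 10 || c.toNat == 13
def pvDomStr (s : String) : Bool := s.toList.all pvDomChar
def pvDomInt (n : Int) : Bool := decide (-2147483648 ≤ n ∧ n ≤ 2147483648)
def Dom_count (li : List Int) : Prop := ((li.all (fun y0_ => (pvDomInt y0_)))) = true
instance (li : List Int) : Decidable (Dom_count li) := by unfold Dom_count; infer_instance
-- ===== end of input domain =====

-- B replaces A's single accumulating if/elif loop by a divide-and-conquer recursion that splits the index range and merges the halves' count vectors by pairwise addition (alternative algorithm, same cost).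


-- ===== PORT A =====
def count (li : List Int) : List Int :=
  let s := li.foldl (fun (acc : Int × Int × Int) l =>
    if l == 0 then (acc.1 + 1, acc.2.1, acc.2.2)
    else if l == 1 then (acc.1, acc.2.1 + 1, acc.2.2)
    else (acc.1, acc.2.1, acc.2.2 + 1)) (0, 0, 0)
  [s.1, s.2.1, s.2.2]

-- ===== PORT B =====
-- go: the inner recursion of Source B. fuel is a totality guard only: it bounds the
-- range length hi-lo, which strictly shrinks at each recursive call, so with
-- fuel = li.length the guard never fires on the call count_alt makes.
-- li[lo] is in range whenever 0 ≤ lo < li.length (the none branch is unreachable there).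
def countGo (li : List Int) : Nat → Int → Int → Int × Int × Int
  | 0, _, _ => (0, 0, 0)
  | fuel + 1, lo, hi =>
    if hi ≤ lo then (0, 0, 0)
    else if hi - lo = 1 then
      match PySem.List.pyGet? li lo with
      | some x => if x = 0 then (1, 0, 0) else if x = 1 then (0, 1, 0) else (0, 0, 1)
      | none => (0, 0, 0)
    else
      let mid := PySem.Int.floordiv (lo + hi) 2
      let a := countGo li fuel lo mid
      let b := countGo li fuel mid hi
      (a.1 + b.1, a.2.1 + b.2.1, a.2.2 + b.2.2)

def count_alt (li : List Int) : List Int :=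
  let s := countGo li li.length 0 (li.length : Int)
  [s.1, s.2.1, s.2.2]

-- ===== PRECONDITION & SPEC =====
def Spec_count (li : List Int) (out : List Int) : Prop := out = count_alt li
instance (li : List Int) (out : List Int) : Decidable (Spec_count li out) := by unfold Spec_count; infer_instance

-- ===== CLAIM =====
def Claim_equal_count : Prop := ∀ (li : List Int), Dom_count li → Spec_count li (count li)

-- ===== LEMMAS AND PROOFS =====
theorem count_fold_inv (li : List Int) (a b c : Int) :
    li.foldl (fun (acc : Int × Int × Int) l =>
      if l == 0 then (acc.1 + 1, acc.2.1, acc.2.2)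
      else if l == 1 then (acc.1, acc.2.1 + 1, acc.2.2)
      else (acc.1, acc.2.1, acc.2.2 + 1)) (a, b, c)
    = (a + li.count 0, b + li.count 1,
       c + ((li.length : Int) - li.count 0 - li.count 1)) := by
  induction li generalizing a b c with
  | nil => simp
  | cons x xs ih =>
    rw [List.foldl_cons]
    by_cases h0 : x = 0
    · subst h0
      rw [if_pos (by decide), ih]
      simp [Prod.ext_iff]
      omega
    · by_cases h1 : x = 1
      · subst h1
        rw [if_neg (by decide), if_pos (by decide), ih]
        simp [Prod.ext_iff]
        omega
      · rw [if_neg (by simpa using h0), if_neg (by simpa using h1), ih]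
        simp [Prod.ext_iff, h0, h1]
        omega

-- countGo with enough fuel computes the count vector of the corresponding sublist.
theorem countGo_eq (li : List Int) :
    ∀ (fuel : Nat) (lo hi : Int), 0 ≤ lo → lo ≤ hi → hi ≤ (li.length : Int) →
      (hi - lo).toNat ≤ fuel →
      countGo li fuel lo hi =
        ((((li.drop lo.toNat).take (hi - lo).toNat).count 0 : Int),
         (((li.drop lo.toNat).take (hi - lo).toNat).count 1 : Int),
         ((hi - lo).toNat : Int)
           - ((li.drop lo.toNat).take (hi - lo).toNat).count 0
           - ((li.drop lo.toNat).take (hi - lo).toNat).count 1) := by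
  intro fuel
  induction fuel with
  | zero =>
    intro lo hi h0 hle hlen hf
    have : hi = lo := by omega
    subst this
    simp [countGo]
  | succ fuel ih =>
    intro lo hi h0 hle hlen hf
    by_cases hempty : hi ≤ lo
    · have : hi = lo := by omega
      subst this
      simp [countGo]
    · by_cases hone : hi - lo = 1
      · have hlt : lo.toNat < li.length := by omega
        have hget : PySem.List.pyGet? li lo = some li[lo.toNat] := by
          have h := PySem.List.pyGet?_natCast (xs := li) (n := lo.toNat)
          rw [show ((lo.toNat : Nat) : Int) = lo from by omega] at h
          rw [h, List.getElem?_eq_getElem hlt]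
        have hdrop : (li.drop lo.toNat).take (hi - lo).toNat = [li[lo.toNat]] := by
          rw [show (hi - lo).toNat = 1 from by omega, List.drop_eq_getElem_cons hlt]
          rfl
        simp only [countGo, if_neg hempty, if_pos hone, hget, hdrop]
        by_cases hx0 : li[lo.toNat] = 0
        · simp [hx0]
          omega
        · by_cases hx1 : li[lo.toNat] = 1
          · simp [hx1]
            omega
          · simp [hx0, hx1]
            omega
      · have h2 : 2 ≤ hi - lo := by omega
        simp only [countGo, if_neg hempty, if_neg hone]
        set mid := PySem.Int.floordiv (lo + hi) 2 with hmid
        have hmid' : mid = (lo + hi) / 2 := by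
          rw [hmid, PySem.Int.floordiv_eq_ediv_of_pos (by omega)]
        have hlo : lo < mid := by omega
        have hhi : mid < hi := by omega
        have hA := ih lo mid h0 (by omega) (by omega) (by omega)
        have hB := ih mid hi (by omega) (by omega) hlen (by omega)
        simp only [hA, hB]
        have hsplit :
            (li.drop lo.toNat).take (mid - lo).toNat ++ (li.drop mid.toNat).take (hi - mid).toNat
              = (li.drop lo.toNat).take (hi - lo).toNat := by
          have h1 : (mid - lo).toNat + (hi - mid).toNat = (hi - lo).toNat := by omega
          have h2' : (li.drop lo.toNat).drop (mid - lo).toNat = li.drop mid.toNat := by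
            rw [List.drop_drop]
            congr 1
            omega
          rw [← h1, List.take_add, h2']
        have hc0 := congrArg (fun l => List.count (0 : Int) l) hsplit
        have hc1 := congrArg (fun l => List.count (1 : Int) l) hsplit
        simp only [List.count_append] at hc0 hc1
        simp only [Prod.ext_iff]
        refine ⟨?_, ?_, ?_⟩ <;> omega

-- ===== VERDICT =====
theorem count_spec : Claim_equal_count := by
  intro li _
  unfold Spec_count count count_alt
  rw [count_fold_inv, countGo_eq li li.length 0 (li.length : Int) (by omega) (by omega) (by omega) (by omega)]
  simp
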